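-- pv_equiv track=rewrite | github.com/ayhem18/Towards_SE | Algorithms/NeetCodeRoadMap/sliding_window.py | __build_blocks_and_links
-- ===== SOURCE A (Python) =====
-- def __build_blocks_and_links(values: list[int]):
--     blocks = [[values[0]]]
--     links = []
--     last_value = values[0]
--     for v in values[1:]:
--         if v > last_value + 1:
--             blocks[-1] = len(blocks[-1])
--             links.append(v - last_value - 1)
--             blocks.append([v])
--         else:
--             blocks[-1].append(v)
--         last_value = v
--
--     if isinstance(blocks[-1], list):
--         blocks[-1] = len(blocks[-1])
--
--     return blocks, links
-- ===== SOURCE B (Python) =====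
-- def __build_blocks_and_links(values):
--     pairs = list(zip(values, values[1:]))
--     links = [b - a - 1 for a, b in pairs if b > a + 1]
--     breaks = [i + 1 for i, (a, b) in enumerate(pairs) if b > a + 1]
--     edges = [0] + breaks + [len(values)]
--     blocks = [e2 - e1 for e1, e2 in zip(edges, edges[1:])]
--     return blocks, links
-- ===== Notes on version B (the rewrite author's own statement) =====
-- stated objective: alternative
-- what changed: B replaces A's stateful one-pass accumulator (growing the current block in place and flushing it on each gap) by a declarative derivation: it zips the list with its tail to find break positions, reads the links directly off the breaking pairs, and obtains the block sizes as consecutive differences of the segment-edge list (zero, then the breaks, then the length).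
import Mathlib
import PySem

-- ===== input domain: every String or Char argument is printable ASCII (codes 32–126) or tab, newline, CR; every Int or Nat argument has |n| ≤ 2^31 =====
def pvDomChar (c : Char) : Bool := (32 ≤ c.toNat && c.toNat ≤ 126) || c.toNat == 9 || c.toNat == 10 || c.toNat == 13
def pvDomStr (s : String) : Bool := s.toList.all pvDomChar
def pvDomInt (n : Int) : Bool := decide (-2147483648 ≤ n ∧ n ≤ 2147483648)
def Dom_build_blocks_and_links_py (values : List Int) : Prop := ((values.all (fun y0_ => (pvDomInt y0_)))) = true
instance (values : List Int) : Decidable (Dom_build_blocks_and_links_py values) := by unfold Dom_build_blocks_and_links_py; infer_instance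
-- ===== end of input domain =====

-- B replaces A's stateful block-accumulator loop by deriving break positions from adjacent
-- pairs and taking consecutive differences of the segment edges (alternative decomposition,
-- same O(n) cost). Return value only; neither version mutates its argument.

-- ===== PORT A =====
-- state = (done block lengths, current block (Python keeps it as the list tail `blocks[-1]`), links, last_value)
def stepA (s : List Int × List Int × List Int × Int) (v : Int) : List Int × List Int × List Int × Int :=
  match s with
  | (done, cur, links, last) =>
    if v > last + 1 then (done ++ [(cur.length : Int)], [v], links ++ [v - last - 1], v)
    else (done, cur ++ [v], links, v)

def build_blocks_and_links_py (values : List Int) : List Int × List Int :=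
  match values with
  | [] => ([], [])   -- Python raises IndexError on values[0]; excluded by Pre_
  | v0 :: rest =>    -- values[1:] = rest
    match rest.foldl stepA ([], [v0], [], v0) with
    | (done, cur, links, _) =>
      -- final `if isinstance(blocks[-1], list)`: the tail block is always still a list here
      (done ++ [(cur.length : Int)], links)

-- ===== PORT B =====
-- pairs = list(zip(values, values[1:]))
def pvPairs (values : List Int) : List (Int × Int) := values.zip (values.drop 1)
-- links = [b - a - 1 for a, b in pairs if b > a + 1]
def pvLinks (ps : List (Int × Int)) : List Int :=
  (ps.filter (fun p => decide (p.2 > p.1 + 1))).map (fun p => p.2 - p.1 - 1)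
-- breaks = [i + 1 for i, (a, b) in enumerate(pairs) if b > a + 1]
def pvBreaks (ps : List (Int × Int)) : List Int :=
  ((PySem.List.enumerate ps 0).filter (fun ip => decide (ip.2.2 > ip.2.1 + 1))).map (fun ip => ip.1 + 1)
-- blocks = [e2 - e1 for e1, e2 in zip(edges, edges[1:])]
def pvDiffs (l : List Int) : List Int := (l.zip (l.drop 1)).map (fun p => p.2 - p.1)

def build_blocks_and_links_py_alt (values : List Int) : List Int × List Int :=
  let pairs := pvPairs values
  let links := pvLinks pairs
  let breaks := pvBreaks pairs
  let edges := (0 : Int) :: (breaks ++ [(values.length : Int)])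
  let blocks := pvDiffs edges
  (blocks, links)

-- ===== PRECONDITION & SPEC =====
-- Pre_ excludes only the empty list, on which A raises IndexError (values[0]).
def Pre_build_blocks_and_links_py (values : List Int) : Prop := values ≠ []
instance (values : List Int) : Decidable (Pre_build_blocks_and_links_py values) := by
  unfold Pre_build_blocks_and_links_py; infer_instance
def pvWitness_build_blocks_and_links_py : List Int := [1, 2, 5, 5, 9]

def Spec_build_blocks_and_links_py (values : List Int) (out : List Int × List Int) : Prop := out = build_blocks_and_links_py_alt values
instance (values : List Int) (out : List Int × List Int) : Decidable (Spec_build_blocks_and_links_py values out) := by unfold Spec_build_blocks_and_links_py; infer_instance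

-- ===== CLAIM (what is proved, stated in full; the proofs are below) =====
def Claim_equal_build_blocks_and_links_py : Prop := ∀ (values : List Int), Dom_build_blocks_and_links_py values → Pre_build_blocks_and_links_py values → Spec_build_blocks_and_links_py values (build_blocks_and_links_py values)

-- ===== LEMMAS AND PROOFS =====

-- Common specification: for the list p :: xs, goBL p xs = (length of first block,
-- remaining block lengths, links).
def goBL (p : Int) (xs : List Int) : Int × List Int × List Int :=
  match xs with
  | [] => (1, [], [])
  | v :: rest =>
    let r := goBL v rest
    if v > p + 1 then (1, r.1 :: r.2.1, (v - p - 1) :: r.2.2)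
    else (r.1 + 1, r.2.1, r.2.2)

-- A's loop computes goBL
lemma lemA (xs : List Int) : ∀ (d c l : List Int) (p : Int),
    (match xs.foldl stepA (d, c, l, p) with
     | (done, cur, links, _) => (done ++ [(cur.length : Int)], links))
    = (d ++ (((c.length : Int) - 1 + (goBL p xs).1) :: (goBL p xs).2.1),
       l ++ (goBL p xs).2.2) := by
  induction xs with
  | nil => intro d c l p; simp [goBL]
  | cons v rest ih =>
    intro d c l p
    by_cases h : v > p + 1
    · simp only [List.foldl_cons, stepA, if_pos h, ih, goBL]
      simp
    · simp only [List.foldl_cons, stepA, if_neg h, ih, goBL]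
      simp

-- breaks with a shifted enumerate start
def brkS (s : Int) (ps : List (Int × Int)) : List Int :=
  ((PySem.List.enumerate ps s).filter (fun ip => decide (ip.2.2 > ip.2.1 + 1))).map (fun ip => ip.1 + 1)

lemma pvBreaks_eq_brkS (ps : List (Int × Int)) : pvBreaks ps = brkS 0 ps := rfl

lemma brkS_cons (s : Int) (q : Int × Int) (ps : List (Int × Int)) :
    brkS s (q :: ps) = (if q.2 > q.1 + 1 then [s + 1] else []) ++ brkS (s + 1) ps := by
  by_cases h : q.2 > q.1 + 1 <;> simp [brkS, PySem.List.enumerate_cons, h]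

lemma brkS_shift (ps : List (Int × Int)) : ∀ s : Int, brkS s ps = (brkS 0 ps).map (· + s) := by
  induction ps with
  | nil => intro s; simp [brkS]
  | cons q ps ih =>
    intro s
    rw [brkS_cons, brkS_cons]
    simp only [zero_add]
    rw [ih (s + 1), ih 1]
    have hmap : ((brkS 0 ps).map (· + (1 : Int))).map (· + s) = (brkS 0 ps).map (· + (s + 1)) := by
      rw [List.map_map]
      refine List.map_congr_left (fun x _ => ?_)
      simp only [Function.comp_apply]
      ring
    by_cases h : q.2 > q.1 + 1 <;> simp [h, hmap] <;> omega

lemma pvDiffs_cons₂ (a b : Int) (l : List Int) :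
    pvDiffs (a :: b :: l) = (b - a) :: pvDiffs (b :: l) := rfl

lemma pvDiffs_map_add (c : Int) (l : List Int) : pvDiffs (l.map (· + c)) = pvDiffs l := by
  induction l with
  | nil => rfl
  | cons a l ih =>
    cases l with
    | nil => rfl
    | cons b r =>
      simp only [List.map_cons] at ih ⊢
      rw [pvDiffs_cons₂, pvDiffs_cons₂, ih]
      congr 1
      ring

lemma pvLinks_cons (q : Int × Int) (ps : List (Int × Int)) :
    pvLinks (q :: ps) = (if q.2 > q.1 + 1 then [q.2 - q.1 - 1] else []) ++ pvLinks ps := by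
  by_cases h : q.2 > q.1 + 1 <;> simp [pvLinks, h]

-- the diffs of segment edges after shifting every internal edge by one
lemma pvDiffs_zero_shift (x : Int) (t2 : List Int) :
    pvDiffs ((0 : Int) :: (x :: t2).map (· + 1)) = (x + 1) :: pvDiffs (x :: t2) := by
  simp only [List.map_cons]
  rw [pvDiffs_cons₂, show ((x + 1) :: t2.map (· + 1)) = (x :: t2).map (· + 1) from rfl,
    pvDiffs_map_add]
  norm_num

-- B computes goBL
lemma lemB (rest : List Int) : ∀ v0 : Int,
    build_blocks_and_links_py_alt (v0 :: rest)
    = ((goBL v0 rest).1 :: (goBL v0 rest).2.1, (goBL v0 rest).2.2) := by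
  induction rest with
  | nil =>
    intro v0
    simp [build_blocks_and_links_py_alt, pvPairs, pvLinks, pvBreaks, pvDiffs, goBL,
      PySem.List.enumerate_nil]
  | cons v1 r ih =>
    intro v0
    have ih' := ih v1
    simp only [build_blocks_and_links_py_alt, pvBreaks_eq_brkS] at ih' ⊢
    have hpairs : pvPairs (v0 :: v1 :: r) = (v0, v1) :: pvPairs (v1 :: r) := rfl
    rw [hpairs, pvLinks_cons, brkS_cons]
    simp only [zero_add]
    rw [brkS_shift (pvPairs (v1 :: r)) 1]
    obtain ⟨x, t2, ht⟩ : ∃ x t2,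
        brkS 0 (pvPairs (v1 :: r)) ++ [((v1 :: r).length : Int)] = x :: t2 := by
      rcases h : brkS 0 (pvPairs (v1 :: r)) ++ [((v1 :: r).length : Int)] with _ | ⟨x, t2⟩
      · exact absurd h (by simp)
      · exact ⟨x, t2, rfl⟩
    rw [ht] at ih'
    have hlen : ((v0 :: v1 :: r).length : Int) = ((v1 :: r).length : Int) + 1 := by
      simp
    have hed : (brkS 0 (pvPairs (v1 :: r))).map (· + 1) ++ [((v0 :: v1 :: r).length : Int)]
        = (x :: t2).map (· + 1) := by
      rw [hlen, ← ht]; simp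
    have hdif0 : pvDiffs ((0 : Int) :: x :: t2) = x :: pvDiffs (x :: t2) := by
      rw [pvDiffs_cons₂]; norm_num
    rw [hdif0] at ih'
    simp only [Prod.mk.injEq] at ih'
    obtain ⟨hb, hl⟩ := ih'
    have hx : x = (goBL v1 r).1 := (List.cons.inj hb).1
    have ht2 : pvDiffs (x :: t2) = (goBL v1 r).2.1 := (List.cons.inj hb).2
    by_cases h : v1 > v0 + 1
    · simp only [if_pos h, List.cons_append, List.nil_append]
      have he : ((1 : Int) :: ((brkS 0 (pvPairs (v1 :: r))).map (· + 1) ++ [((v0 :: v1 :: r).length : Int)]))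
          = ((0 : Int) :: x :: t2).map (· + 1) := by
        rw [hed]; simp
      rw [show ((0 : Int) :: (1 : Int) :: ((brkS 0 (pvPairs (v1 :: r))).map (· + 1) ++ [((v0 :: v1 :: r).length : Int)]))
          = (0 : Int) :: ((0 : Int) :: x :: t2).map (· + 1) by rw [← he],
        pvDiffs_zero_shift, hdif0, ht2, hx, hl]
      simp [goBL, h]
    · simp only [if_neg h, List.nil_append]
      rw [hed, pvDiffs_zero_shift, ht2, hx, hl]
      simp [goBL, h]

-- ===== VERDICT (by name: the statement is the Claim_ definition above) =====
theorem build_blocks_and_links_py_spec : Claim_equal_build_blocks_and_links_py := by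
  intro values _ hpre
  unfold Spec_build_blocks_and_links_py
  cases values with
  | nil => exact absurd rfl hpre
  | cons v0 rest =>
    rw [lemB rest v0]
    show (match rest.foldl stepA ([], [v0], [], v0) with
      | (done, cur, links, _) => (done ++ [(cur.length : Int)], links)) = _
    rw [lemA rest [] [v0] [] v0]
    simp
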